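-- pv_equiv track=rewrite | github.com/Hunterdii/GeeksforGeeks-POTD | April 2024 GFG SOLUTION/April-22.py | minRow
-- ===== SOURCE A (Python) =====
-- import math
--
-- def minRow(n, m, a):
--     res = 1
--     min_val = math.inf
--     for i in range(n):
--         count = 0
--         for j in range(m):
--             if a[i][j] == 1:
--                 count += 1
--         minn = min(count, min_val)
--         if minn != min_val:
--             res = i + 1
--             min_val = minn
--     return res
-- ===== SOURCE B (Python) =====
-- def minRow(n, m, a):
--     counts = [sum(a[i][j] == 1 for j in range(m)) for i in range(n)]
--     if not counts:
--         return 1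
--     return counts.index(min(counts)) + 1
-- ===== Notes on version B (the rewrite author's own statement) =====
-- stated objective: simpler
-- what changed: Replaces the interleaved index-loop accumulation of (res, min_val) with a build-table-then-scan decomposition: compute the per-row 1-counts as a list, then return the first index of its minimum via counts.index(min(counts)).
import Mathlib
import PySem

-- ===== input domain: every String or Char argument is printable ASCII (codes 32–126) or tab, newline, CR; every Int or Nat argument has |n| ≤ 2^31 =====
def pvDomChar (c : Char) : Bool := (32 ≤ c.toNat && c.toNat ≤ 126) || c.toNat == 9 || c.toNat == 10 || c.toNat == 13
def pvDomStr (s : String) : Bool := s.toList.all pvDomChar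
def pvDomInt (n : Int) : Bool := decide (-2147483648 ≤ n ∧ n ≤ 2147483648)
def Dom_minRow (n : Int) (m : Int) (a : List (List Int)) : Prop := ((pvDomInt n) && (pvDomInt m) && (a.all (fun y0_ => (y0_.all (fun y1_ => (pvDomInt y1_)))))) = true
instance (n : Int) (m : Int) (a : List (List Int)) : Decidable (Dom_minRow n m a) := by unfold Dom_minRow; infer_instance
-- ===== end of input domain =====

-- B replaces A's interleaved (res, min_val) accumulation over indices by a
-- build-table-then-scan decomposition: per-row 1-counts first, then first index of the minimum.

-- ===== PORT A =====
def minRow (n : Int) (m : Int) (a : List (List Int)) : Int :=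
  ((PySem.List.pyRange 0 n 1).foldl
    (fun (st : Int × Option Int) i =>
      let count : Int := (PySem.List.pyRange 0 m 1).foldl
        (fun c j => if PySem.List.pyGetD (PySem.List.pyGetD a i []) j 0 = 1 then c + 1 else c) 0
      let minn : Option Int := some (match st.2 with | none => count | some v => min count v)
      if minn ≠ st.2 then (i + 1, minn) else st)
    ((1 : Int), (none : Option Int))).1

-- ===== PORT B =====
def minRow_alt (n : Int) (m : Int) (a : List (List Int)) : Int :=
  let counts : List Int :=
    (PySem.List.pyRange 0 n 1).map (fun i =>
      ((PySem.List.pyRange 0 m 1).map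
        (fun j => if PySem.List.pyGetD (PySem.List.pyGetD a i []) j 0 = 1 then (1 : Int) else 0)).sum)
  match PySem.List.min? counts (fun x => x) with
  | none => 1                                   -- "if not counts: return 1"
  | some mn => ((PySem.List.index? counts mn).getD 0 : Int) + 1

-- ===== PRECONDITION & SPEC =====
-- Pre_ is exactly the raise-free domain of Python A: `a[i][j]` is only evaluated when the
-- inner range(m) is nonempty, so nothing is indexed when m ≤ 0; otherwise every scanned row
-- index must be in range (n ≤ len(a), vacuous when n ≤ 0) and every scanned row long enough.
def Pre_minRow (n : Int) (m : Int) (a : List (List Int)) : Prop :=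
  m ≤ 0 ∨
    ((n ≤ (a.length : Int) ∨ n ≤ 0) ∧
      ∀ row ∈ a.take n.toNat, m ≤ (row.length : Int))
instance (n : Int) (m : Int) (a : List (List Int)) : Decidable (Pre_minRow n m a) := by
  unfold Pre_minRow; infer_instance

def pvWitness_minRow : Int × Int × List (List Int) := (3, 2, [[1, 1], [0, 1], [0, 0]])

def Spec_minRow (n : Int) (m : Int) (a : List (List Int)) (out : Int) : Prop := out = minRow_alt n m a
instance (n : Int) (m : Int) (a : List (List Int)) (out : Int) : Decidable (Spec_minRow n m a out) := by unfold Spec_minRow; infer_instance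

-- ===== CLAIM (what is proved, stated in full; the proofs are below) =====
def Claim_equal_minRow : Prop := ∀ (n : Int) (m : Int) (a : List (List Int)), Dom_minRow n m a → Pre_minRow n m a → Spec_minRow n m a (minRow n m a)

-- ===== LEMMAS AND PROOFS =====

-- Proof-only recursive description of A's running-minimum loop once min_val is an int:
-- k is the 1-based answer to record if the head improves; (r, v) the current (res, min_val).
def bestAux : List Int → Int → Int → Int → Int × Int
  | [], _, r, v => (r, v)
  | c :: t, k, r, v => if c < v then bestAux t (k + 1) k c else bestAux t (k + 1) r v

theorem foldl_min_le (t : List Int) (v : Int) : t.foldl min v ≤ v := by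
  induction t generalizing v with
  | nil => simp
  | cons c t ih => exact le_trans (ih (min v c)) (min_le_left _ _)

theorem foldl_min_mem (l : List Int) (v : Int) (h : l.foldl min v < v) :
    l.foldl min v ∈ l := by
  induction l generalizing v with
  | nil => simp at h
  | cons c s ih =>
    by_cases hcv : c < v
    · have hmin : min v c = c := min_eq_right hcv.le
      rw [List.foldl_cons, hmin] at h ⊢
      by_cases h2 : s.foldl min c < c
      · exact List.mem_cons_of_mem _ (ih c h2)
      · have he : s.foldl min c = c := le_antisymm (foldl_min_le s c) (not_lt.mp h2)
        rw [he]; exact List.mem_cons_self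
    · have hmin : min v c = v := min_eq_left (not_lt.mp hcv)
      rw [List.foldl_cons, hmin] at h ⊢
      exact List.mem_cons_of_mem _ (ih v h)

theorem idxOf?_of_mem (l : List Int) (v : Int) (h : v ∈ l) :
    l.idxOf? v = some (l.idxOf v) := by
  induction l with
  | nil => simp at h
  | cons c t ih =>
    by_cases hc : c = v
    · subst hc; simp [List.idxOf?_cons]
    · rcases List.mem_cons.mp h with h1 | h2
      · exact absurd h1.symm hc
      · simp [List.idxOf?_cons, hc, ih h2]

theorem bestAux_spec (cs : List Int) (k r v : Int) :
    bestAux cs k r v =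
      if cs.foldl min v < v
      then (k + (cs.idxOf (cs.foldl min v) : Int), cs.foldl min v)
      else (r, v) := by
  induction cs generalizing k r v with
  | nil => simp [bestAux]
  | cons c t ih =>
    by_cases hc : c < v
    · have hmin : min v c = c := min_eq_right hc.le
      rw [show bestAux (c :: t) k r v = bestAux t (k + 1) k c from by
            simp [bestAux, hc], ih]
      have hM : (c :: t).foldl min v = t.foldl min c := by simp [hmin]
      by_cases hlt : t.foldl min c < c
      · have h1 : (c :: t).foldl min v < v := by rw [hM]; exact lt_trans hlt hc
        have hne : c ≠ t.foldl min c := (ne_of_gt hlt)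
        rw [if_pos hlt, if_pos h1, hM, List.idxOf_cons_ne _ hne]
        simp [Prod.ext_iff]; ring
      · have heq : t.foldl min c = c := le_antisymm (foldl_min_le t c) (not_lt.mp hlt)
        have h1 : (c :: t).foldl min v < v := by rw [hM, heq]; exact hc
        rw [if_neg hlt, if_pos h1, hM, heq, List.idxOf_cons_self]
        simp
    · have hmin : min v c = v := min_eq_left (not_lt.mp hc)
      rw [show bestAux (c :: t) k r v = bestAux t (k + 1) r v from by
            simp [bestAux, hc], ih]
      have hM : (c :: t).foldl min v = t.foldl min v := by simp [hmin]
      by_cases hlt : t.foldl min v < v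
      · have hne : c ≠ t.foldl min v := by
          intro h; exact hc (h ▸ hlt)
        rw [if_pos hlt, if_pos (hM ▸ hlt), hM, List.idxOf_cons_ne _ hne]
        simp [Prod.ext_iff]; ring
      · rw [if_neg hlt, if_neg (by rw [hM]; exact hlt)]

-- A's running-minimum body once the state is (r, some v), over the enumerated count table.
theorem foldA_some (cs : List Int) :
    ∀ (s r v : Int),
    (PySem.List.enumerate cs s).foldl
      (fun (st : Int × Option Int) p =>
        if (some (match st.2 with | none => p.2 | some w => min p.2 w) : Option Int) ≠ st.2
        then (p.1 + 1, some (match st.2 with | none => p.2 | some w => min p.2 w))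
        else st)
      (r, some v)
    = ((bestAux cs (s + 1) r v).1, some (bestAux cs (s + 1) r v).2) := by
  induction cs with
  | nil => intro s r v; simp [PySem.List.enumerate_nil, bestAux]
  | cons x t ih =>
    intro s r v
    rw [PySem.List.enumerate_cons, List.foldl_cons]
    by_cases h : x < v
    · have hmin : min x v = x := min_eq_left h.le
      rw [if_pos (by simp [hmin]; exact ne_of_lt h)]
      simp only [hmin]
      rw [ih (s + 1) (s + 1) x]
      simp [bestAux, h]
    · have hmin : min x v = v := min_eq_right (not_lt.mp h)
      rw [if_neg (by simp [hmin])]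
      rw [ih (s + 1) r v]
      simp [bestAux, h]

-- a conditional-increment fold is the sum of 0/1 indicators
theorem fold_if_eq_sum (l : List Int) (row : List Int) : ∀ (c0 : Int),
    l.foldl (fun c j => if PySem.List.pyGetD row j 0 = 1 then c + 1 else c) c0
    = c0 + (l.map (fun j => if PySem.List.pyGetD row j 0 = 1 then (1 : Int) else 0)).sum := by
  induction l with
  | nil => intro c0; simp
  | cons x t ih =>
    intro c0
    rw [List.foldl_cons, List.map_cons, List.sum_cons, ih]
    by_cases h : PySem.List.pyGetD row x 0 = 1
    · simp [h]; ring
    · simp [h]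

theorem minRow_main (n : Int) (m : Int) (a : List (List Int)) :
    minRow n m a = minRow_alt n m a := by
  unfold minRow minRow_alt
  by_cases hn : 0 ≤ n
  case neg =>
    have hnil : PySem.List.pyRange 0 n 1 = [] := PySem.List.pyRange_one_eq_nil (by omega)
    simp [hnil, PySem.List.min?]
  case pos =>
  -- the per-row count, exactly as A computes it
  set f : Int → Int := fun i =>
    (PySem.List.pyRange 0 m 1).foldl
      (fun c j => if PySem.List.pyGetD (PySem.List.pyGetD a i []) j 0 = 1 then c + 1 else c) 0
    with hf
  -- B's count table is the same function mapped over the same range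
  have hcounts :
      (PySem.List.pyRange 0 n 1).map (fun i =>
        ((PySem.List.pyRange 0 m 1).map
          (fun j => if PySem.List.pyGetD (PySem.List.pyGetD a i []) j 0 = 1 then (1 : Int) else 0)).sum)
      = (PySem.List.pyRange 0 n 1).map f := by
    apply List.map_congr_left
    intro i _
    rw [hf]
    simpa using (fold_if_eq_sum (PySem.List.pyRange 0 m 1) (PySem.List.pyGetD a i []) 0).symm
  rw [hcounts]
  set counts : List Int := (PySem.List.pyRange 0 n 1).map f with hcts
  -- A's fold over range(n) is a fold over the enumerated count table
  have hlen : PySem.List.len counts = n := by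
    rw [PySem.List.len_eq, hcts, List.length_map, PySem.List.length_pyRange_one]; omega
  have henum : PySem.List.enumerate counts 0
      = (PySem.List.pyRange 0 n 1).map (fun j => (j, f j)) := by
    rw [PySem.List.enumerate_eq_map_pyRange counts 0, hlen]
    apply List.map_congr_left
    intro j hj
    have hj' := (PySem.List.mem_pyRange_one).mp hj
    rw [hcts, PySem.List.pyGetD_map_pyRange_of_nonneg f n j 0 hj'.1 hj'.2]
  have hA :
      (PySem.List.pyRange 0 n 1).foldl
        (fun (st : Int × Option Int) i =>
          let count : Int := (PySem.List.pyRange 0 m 1).foldl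
            (fun c j => if PySem.List.pyGetD (PySem.List.pyGetD a i []) j 0 = 1 then c + 1 else c) 0
          let minn : Option Int := some (match st.2 with | none => count | some v => min count v)
          if minn ≠ st.2 then (i + 1, minn) else st)
        ((1 : Int), (none : Option Int))
      = (PySem.List.enumerate counts 0).foldl
        (fun (st : Int × Option Int) p =>
          if (some (match st.2 with | none => p.2 | some w => min p.2 w) : Option Int) ≠ st.2
          then (p.1 + 1, some (match st.2 with | none => p.2 | some w => min p.2 w))
          else st)
        ((1 : Int), (none : Option Int)) := by
    rw [henum, List.foldl_map]
  rw [hA]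
  cases hc : counts with
  | nil => simp [PySem.List.enumerate_nil, PySem.List.min?]
  | cons x t =>
    rw [PySem.List.enumerate_cons, List.foldl_cons]
    rw [if_pos (by simp)]
    rw [show ((0 : Int) + 1) = 1 from rfl]
    rw [foldA_some t 1 1 x]
    simp only []
    rw [PySem.List.min?_id_cons, bestAux_spec]
    set M : Int := t.foldl min x with hM
    have hMle : M ≤ x := foldl_min_le _ _
    by_cases hlt : M < x
    · rw [if_pos hlt]
      have hne : x ≠ M := ne_of_gt hlt
      have hmem : M ∈ t := by rw [hM]; exact foldl_min_mem t x hlt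
      have hidx2 : PySem.List.index? t M = some (t.idxOf M) := by
        rw [PySem.List.index?_eq_idxOf?]
        exact idxOf?_of_mem _ _ hmem
      have hidx : PySem.List.index? (x :: t) M = some (t.idxOf M + 1) := by
        rw [PySem.List.index?_cons_of_ne _ hne, hidx2]; rfl
      rw [PySem.List.index?_eq_idxOf?] at hidx
      simp [hidx]
      ring
    · have heq : M = x := le_antisymm hMle (not_lt.mp hlt)
      rw [if_neg hlt]
      have hidx : PySem.List.index? (x :: t) M = some 0 := by
        rw [heq]; exact PySem.List.index?_cons_self _ _
      rw [PySem.List.index?_eq_idxOf?] at hidx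
      simp [hidx]

-- ===== VERDICT (by name: the statement is the Claim_ definition above) =====
theorem minRow_spec : Claim_equal_minRow := by
  intro n m a _ _
  exact minRow_main n m a
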